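-- pv_equiv track=rewrite | github.com/manicolas2/kattis_solutions | homework.py | solve
-- ===== SOURCE A (Python) =====
-- def solve(inp):
--     inps = []
--     probs = ""
--     for i in range(0, len(inp)):
--         if inp[i] == ";":
--             inps.append(probs)
--             probs = ""
--         else:
--             probs += inp[i]
--             if i == len(inp) - 1:
--                 inps.append(probs)
--
--     sum = 0
--     for prob in inps:
--         if "-" in prob:
--             min = int(prob.split("-")[0])
--             max = int(prob.split("-")[1])
--             for j in range(min, max+1):
--                 sum += 1
--         else:
--             sum += 1
--     ans = sum
--     return ans
-- ===== SOURCE B (Python) =====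
-- def solve(inp):
--     parts = inp.split(";")
--     if parts[-1] == "":
--         parts.pop()
--     total = 0
--     for seg in parts:
--         if "-" in seg:
--             lo, hi = seg.split("-")[:2]
--             total += max(0, int(hi) - int(lo) + 1)
--         else:
--             total += 1
--     return total
-- ===== Notes on version B (the rewrite author's own statement) =====
-- stated objective: faster
-- what changed: B splits with str.split instead of A's character-by-character scan and replaces A's per-range counting loop (sum += 1 over range(min, max+1)) with the closed form max(0, max-min+1).
import Mathlib
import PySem

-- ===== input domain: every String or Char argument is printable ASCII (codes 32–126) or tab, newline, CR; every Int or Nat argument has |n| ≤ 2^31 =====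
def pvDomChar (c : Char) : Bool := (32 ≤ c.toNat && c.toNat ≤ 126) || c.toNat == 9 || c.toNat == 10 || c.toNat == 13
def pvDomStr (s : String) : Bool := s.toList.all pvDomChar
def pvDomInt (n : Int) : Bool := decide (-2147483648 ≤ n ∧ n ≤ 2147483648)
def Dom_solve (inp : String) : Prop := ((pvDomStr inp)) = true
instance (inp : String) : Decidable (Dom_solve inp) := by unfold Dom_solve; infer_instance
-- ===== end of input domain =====

-- B replaces A's element-by-element counting of each range with the closed form
-- max(0, hi-lo+1) and the manual character scan with str.split (objective: faster).

-- ===== PORT A =====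

-- A's first loop: scan the characters, collecting ';'-separated pieces; at the last
-- character (rest = []) the pending piece is appended (exactly A's `i == len(inp)-1` test).
def aSplit : List Char → List (List Char) → List Char → List (List Char)
  | [], inps, _ => inps
  | c :: rest, inps, probs =>
    if c = ';' then aSplit rest (inps ++ [probs]) []
    else
      let probs' := probs ++ [c]
      aSplit rest (if rest = [] then inps ++ [probs'] else inps) probs'

-- int(...) raises ValueError where ofChars? = none; those inputs are excluded by Pre_solve,
-- the .getD 0 there is never reached on admitted inputs.
def solve (inp : String) : Int :=
  let inps := aSplit inp.toList [] []
  let sum : Int := inps.foldl (fun sum prob =>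
    if PySem.Chars.isIn ['-'] prob then
      let mn := (PySem.Int.ofChars? (PySem.List.pyGetD (PySem.Chars.splitOn prob ['-']) 0 [])).getD 0
      let mx := (PySem.Int.ofChars? (PySem.List.pyGetD (PySem.Chars.splitOn prob ['-']) 1 [])).getD 0
      (PySem.List.pyRange mn (mx + 1) 1).foldl (fun s _ => s + 1) sum
    else sum + 1) 0
  sum

-- ===== PORT B =====

def solve_alt (inp : String) : Int :=
  let parts := PySem.Chars.splitOn inp.toList [';']
  let parts := if PySem.List.pyGetD parts (-1) [] = ([] : List Char) then parts.dropLast else parts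
  parts.foldl (fun total seg =>
    if PySem.Chars.isIn ['-'] seg then
      let ps := PySem.Chars.splitOn seg ['-']
      let lo := (PySem.Int.ofChars? (PySem.List.pyGetD ps 0 [])).getD 0
      let hi := (PySem.Int.ofChars? (PySem.List.pyGetD ps 1 [])).getD 0
      total + max 0 (hi - lo + 1)
    else total + 1) 0

-- ===== PRECONDITION & SPEC =====
-- Pre_ excludes exactly the inputs on which Python A raises ValueError: a semicolon-
-- separated piece that contains a dash but whose first two dash-split parts are not both
-- int()-parseable (B raises the same ValueError there).
def Pre_solve (inp : String) : Prop :=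
  ∀ seg ∈ PySem.Chars.splitOn inp.toList [';'],
    PySem.Chars.isIn ['-'] seg = true →
      (PySem.Int.ofChars? (PySem.List.pyGetD (PySem.Chars.splitOn seg ['-']) 0 [])).isSome = true ∧
      (PySem.Int.ofChars? (PySem.List.pyGetD (PySem.Chars.splitOn seg ['-']) 1 [])).isSome = true
instance (inp : String) : Decidable (Pre_solve inp) := by unfold Pre_solve; infer_instance

def pvWitness_solve : String := "10;3-6;1"

def Spec_solve (inp : String) (out : Int) : Prop := out = solve_alt inp
instance (inp : String) (out : Int) : Decidable (Spec_solve inp out) := by unfold Spec_solve; infer_instance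

-- ===== CLAIM (what is proved, stated in full; the proofs are below) =====
def Claim_equal_solve : Prop := ∀ (inp : String), Dom_solve inp → Pre_solve inp → Spec_solve inp (solve inp)

-- ===== LEMMAS AND PROOFS =====

-- structural single-char split on ';' (proof-only helper)
def pSplit : List Char → List Char → List (List Char)
  | [], cur => [cur]
  | c :: rest, cur => if c = ';' then cur :: pSplit rest [] else pSplit rest (cur ++ [c])

theorem pSplit_ne_nil (cs cur : List Char) : pSplit cs cur ≠ [] := by
  induction cs generalizing cur with
  | nil => simp [pSplit]
  | cons c rest ih => simp only [pSplit]; split <;> simp [ih]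

theorem splitOn_go_semi (fuel : Nat) :
    ∀ (l cur : List Char) (acc : List (List Char)), l.length ≤ fuel →
      PySem.Chars.splitOn.go [';'] fuel l cur acc = acc.reverse ++ pSplit l cur.reverse := by
  induction fuel with
  | zero =>
    intro l cur acc h
    have : l = [] := by cases l <;> simp_all
    subst this
    simp [PySem.Chars.splitOn.go, pSplit]
  | succ n ih =>
    intro l cur acc h
    cases l with
    | nil => simp [PySem.Chars.splitOn.go, pSplit]
    | cons c rest =>
      rw [PySem.Chars.splitOn.go]
      simp only [List.isPrefixOf, Bool.and_true]
      by_cases hc : c = ';'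
      · subst hc
        rw [if_pos (by simp)]
        have h2 := ih rest [] (cur.reverse :: acc) (by simp at h; omega)
        simp only [List.length_singleton, List.drop_succ_cons, List.drop_zero] at *
        rw [h2]
        simp [pSplit]
      · rw [if_neg (by simp [Ne.symm hc])]
        rw [ih rest (c :: cur) acc (by simp at h; omega)]
        simp [pSplit, hc]

theorem splitOn_semi (cs : List Char) :
    PySem.Chars.splitOn cs [';'] = pSplit cs [] := by
  rw [PySem.Chars.splitOn, splitOn_go_semi (cs.length + 1) cs [] [] (by omega)]
  simp

-- drop a trailing empty piece (the adjustment A's manual scan performs implicitly)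
def adj (l : List (List Char)) : List (List Char) :=
  if PySem.List.pyGetD l (-1) [] = ([] : List Char) then l.dropLast else l

theorem pyGetD_neg_one {a : Type} (l : List a) (d : a) :
    PySem.List.pyGetD l (-1) d = l.getLast?.getD d := by
  simp [PySem.List.pyGetD, PySem.List.pyGet?_neg_one]

theorem adj_cons (x : List Char) (l : List (List Char)) (h : l ≠ []) :
    adj (x :: l) = x :: adj l := by
  unfold adj
  cases l with
  | nil => simp at h
  | cons y t =>
    rw [pyGetD_neg_one, pyGetD_neg_one, List.getLast?_cons_cons]
    split <;> simp

theorem aSplit_eq (cs : List Char) (hne : cs ≠ []) :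
    ∀ (inps : List (List Char)) (probs : List Char),
      aSplit cs inps probs = inps ++ adj (pSplit cs probs) := by
  induction cs with
  | nil => simp at hne
  | cons c rest ih =>
    intro inps probs
    by_cases hc : c = ';'
    · subst hc
      simp only [aSplit, pSplit]
      cases rest with
      | nil => simp [aSplit, adj, pSplit, pyGetD_neg_one]
      | cons r t =>
        rw [ih (by simp) (inps ++ [probs]) []]
        simp only [if_true]
        rw [adj_cons _ _ (pSplit_ne_nil _ _)]
        simp
    · simp only [aSplit, if_neg hc]
      cases rest with
      | nil =>
        simp only [aSplit]
        have hnn : probs ++ [c] ≠ [] := by simp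
        simp [pSplit, hc, adj, pyGetD_neg_one, hnn]
      | cons r t =>
        rw [if_neg (by simp)]
        rw [ih (by simp) inps (probs ++ [c])]
        simp [pSplit, hc]

theorem foldl_count (l : List Int) (s : Int) :
    l.foldl (fun s _ => s + 1) s = s + l.length := by
  induction l generalizing s with
  | nil => simp
  | cons x t ih => simp [List.foldl, ih]; omega

theorem step_eq (s : Int) (p : List Char) :
    (if PySem.Chars.isIn ['-'] p then
      let mn := (PySem.Int.ofChars? (PySem.List.pyGetD (PySem.Chars.splitOn p ['-']) 0 [])).getD 0
      let mx := (PySem.Int.ofChars? (PySem.List.pyGetD (PySem.Chars.splitOn p ['-']) 1 [])).getD 0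
      (PySem.List.pyRange mn (mx + 1) 1).foldl (fun s _ => s + 1) s
     else s + 1) =
    (if PySem.Chars.isIn ['-'] p then
      let ps := PySem.Chars.splitOn p ['-']
      let lo := (PySem.Int.ofChars? (PySem.List.pyGetD ps 0 [])).getD 0
      let hi := (PySem.Int.ofChars? (PySem.List.pyGetD ps 1 [])).getD 0
      s + max 0 (hi - lo + 1)
     else s + 1) := by
  by_cases h : PySem.Chars.isIn ['-'] p
  · simp only [if_pos h]
    rw [foldl_count]
    rw [PySem.List.length_pyRange_one]
    omega
  · simp [h]

-- ===== VERDICT (by name: the statement is the Claim_ definition above) =====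
theorem solve_spec : Claim_equal_solve := by
  intro inp _ _
  unfold Spec_solve solve solve_alt
  rw [splitOn_semi]
  have hfold : ∀ (L : List (List Char)) (init : Int),
      L.foldl (fun sum prob =>
        if PySem.Chars.isIn ['-'] prob then
          let mn := (PySem.Int.ofChars? (PySem.List.pyGetD (PySem.Chars.splitOn prob ['-']) 0 [])).getD 0
          let mx := (PySem.Int.ofChars? (PySem.List.pyGetD (PySem.Chars.splitOn prob ['-']) 1 [])).getD 0
          (PySem.List.pyRange mn (mx + 1) 1).foldl (fun s _ => s + 1) sum
        else sum + 1) init =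
      L.foldl (fun total seg =>
        if PySem.Chars.isIn ['-'] seg then
          let ps := PySem.Chars.splitOn seg ['-']
          let lo := (PySem.Int.ofChars? (PySem.List.pyGetD ps 0 [])).getD 0
          let hi := (PySem.Int.ofChars? (PySem.List.pyGetD ps 1 [])).getD 0
          total + max 0 (hi - lo + 1)
        else total + 1) init := by
    intro L
    induction L with
    | nil => intro init; rfl
    | cons p t ih => intro init; simp only [List.foldl]; rw [step_eq, ih]
  cases hcs : inp.toList with
  | nil => simp [aSplit, pSplit, PySem.List.pyGetD, PySem.List.pyGet?, PySem.List.pyIdx?]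
  | cons c rest =>
    rw [aSplit_eq (c :: rest) (by simp)]
    simp only [List.nil_append]
    rw [hfold]
    rfl
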